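-- pv_equiv track=rewrite | github.com/FilipenkArtemy/Public | bot.py | index_best_around
-- ===== SOURCE A (Python) =====
-- import math
--
-- def index_best_around(matrix_len, i, k, matrix_eat):
--     index = []
--     for a in range(i-1,i+2):
--         for b in range(k-1,k+2):
--             if 10 > a >= 0 and 10 > b >= 0 and (a != i or b != k):
--                 index.append([a,b])
--     max_eat = 0
--     for elem in index:
--         if matrix_eat[elem[0]][elem[1]] > max_eat:
--             max_eat = matrix_eat[elem[0]][elem[1]]
--     best_index = [0,0]
--     lowlen = math.inf
--     for elem in index:
--         if matrix_eat[elem[0]][elem[1]] == max_eat and lowlen > matrix_len[elem[0]][elem[1]]: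
--             best_index = elem
--             lowlen = matrix_len[elem[0]][elem[1]]
--     return best_index
-- ===== SOURCE B (Python) =====
-- import math
--
-- def index_best_around(matrix_len, i, k, matrix_eat):
--     # Single fused recursive pass over the eight neighbour offsets, keeping the
--     # lexicographic key (eat desc, length asc); no candidate list, no staged passes.
--     offsets = [(-1, -1), (-1, 0), (-1, 1), (0, -1), (0, 1), (1, -1), (1, 0), (1, 1)]
--
--     def go(offs, best, best_eat, best_len):
--         if not offs:
--             return best
--         (da, db), rest = offs[0], offs[1:]
--         a, b = i + da, k + db
--         if 0 <= a < 10 and 0 <= b < 10: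
--             e = matrix_eat[a][b]
--             if e > best_eat:
--                 return go(rest, [a, b], e, matrix_len[a][b])
--             if e == best_eat and matrix_len[a][b] < best_len:
--                 return go(rest, [a, b], best_eat, matrix_len[a][b])
--         return go(rest, best, best_eat, best_len)
--
--     return go(offsets, [0, 0], 0, math.inf)
-- ===== Notes on version B (the rewrite author's own statement) =====
-- stated objective: alternative
-- what changed: A's three staged loops (build the neighbour candidate list, a running-max scan over their eats, then a best/lowlen selection scan) are replaced by one fused recursive pass over the eight neighbour offsets that keeps a single lexicographic state (best cell, best eat, best length) and never materialises a candidate list.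
-- outside the precondition, e.g. on index_best_around([[7, 4]], 0, 0, [[0, 3], [1, 2]]): A returns [0, 1], B returns [0, 1]
import Mathlib
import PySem

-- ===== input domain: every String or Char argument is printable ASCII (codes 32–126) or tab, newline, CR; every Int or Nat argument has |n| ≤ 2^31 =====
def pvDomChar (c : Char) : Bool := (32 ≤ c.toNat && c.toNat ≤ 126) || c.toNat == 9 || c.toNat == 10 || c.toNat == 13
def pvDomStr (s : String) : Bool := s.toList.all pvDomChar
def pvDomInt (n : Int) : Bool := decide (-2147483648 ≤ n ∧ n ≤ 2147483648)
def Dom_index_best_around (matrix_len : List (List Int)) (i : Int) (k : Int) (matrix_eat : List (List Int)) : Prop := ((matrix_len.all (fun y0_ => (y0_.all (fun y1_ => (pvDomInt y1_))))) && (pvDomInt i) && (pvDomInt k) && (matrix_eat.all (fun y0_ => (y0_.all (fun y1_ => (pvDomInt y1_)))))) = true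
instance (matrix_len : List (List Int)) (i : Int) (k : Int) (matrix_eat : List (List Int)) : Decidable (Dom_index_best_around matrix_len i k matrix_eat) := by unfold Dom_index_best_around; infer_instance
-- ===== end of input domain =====

-- B replaces A's three staged loops by one fused recursive pass over the eight
-- neighbour offsets keeping a (best cell, best eat, best length) state
-- (objective: alternative decomposition, same constant cost).

-- ===== PORT A =====
-- Python's two-element list [a,b] in A's candidate list is ported as the pair (a,b) (fixed arity; exact),
-- lowlen = math.inf is ported as Option Int with none = inf (exact: inf > every int).
-- matrix_eat[a][b] / matrix_len[a][b] are ported with pyGetD; Pre_ excludes exactly out-of-range accesses.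
def index_best_around (matrix_len : List (List Int)) (i : Int) (k : Int) (matrix_eat : List (List Int)) : List Int :=
  let index : List (Int × Int) :=
    (PySem.List.pyRange (i-1) (i+2) 1).foldl (fun acc a =>
      (PySem.List.pyRange (k-1) (k+2) 1).foldl (fun acc' b =>
        if 10 > a ∧ a ≥ 0 ∧ 10 > b ∧ b ≥ 0 ∧ (a ≠ i ∨ b ≠ k) then acc' ++ [(a,b)] else acc') acc) []
  let max_eat : Int := index.foldl (fun m c =>
      if PySem.List.pyGetD (PySem.List.pyGetD matrix_eat c.1 []) c.2 0 > m
      then PySem.List.pyGetD (PySem.List.pyGetD matrix_eat c.1 []) c.2 0 else m) 0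
  let st : (Int × Int) × Option Int := index.foldl (fun s c =>
      if PySem.List.pyGetD (PySem.List.pyGetD matrix_eat c.1 []) c.2 0 = max_eat then
        match s.2 with
        | none => (c, some (PySem.List.pyGetD (PySem.List.pyGetD matrix_len c.1 []) c.2 0))
        | some low =>
            if PySem.List.pyGetD (PySem.List.pyGetD matrix_len c.1 []) c.2 0 < low
            then (c, some (PySem.List.pyGetD (PySem.List.pyGetD matrix_len c.1 []) c.2 0)) else s
      else s) ((0,0), none)
  [st.1.1, st.1.2]

-- ===== PORT B =====
-- Source B's inner recursive `go` over the remaining offsets; best_len = math.inf is Option Int with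
-- none = inf, so `matrix_len[a][b] < best_len` is pvLtO (exact: inf exceeds every int).
def pvLtO (x : Int) : Option Int → Bool
  | none => true
  | some low => decide (x < low)

def pvGoB (matrix_len : List (List Int)) (i : Int) (k : Int) (matrix_eat : List (List Int)) :
    List (Int × Int) → List Int → Int → Option Int → List Int
  | [], best, _, _ => best
  | (da, db) :: rest, best, best_eat, best_len =>
      let a := i + da
      let b := k + db
      if 0 ≤ a ∧ a < 10 ∧ 0 ≤ b ∧ b < 10 then
        let e := PySem.List.pyGetD (PySem.List.pyGetD matrix_eat a []) b 0
        let l := PySem.List.pyGetD (PySem.List.pyGetD matrix_len a []) b 0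
        if e > best_eat then pvGoB matrix_len i k matrix_eat rest [a, b] e (some l)
        else if e = best_eat ∧ pvLtO l best_len then
          pvGoB matrix_len i k matrix_eat rest [a, b] best_eat (some l)
        else pvGoB matrix_len i k matrix_eat rest best best_eat best_len
      else pvGoB matrix_len i k matrix_eat rest best best_eat best_len

def index_best_around_alt (matrix_len : List (List Int)) (i : Int) (k : Int) (matrix_eat : List (List Int)) : List Int :=
  pvGoB matrix_len i k matrix_eat
    [(-1, -1), (-1, 0), (-1, 1), (0, -1), (0, 1), (1, -1), (1, 0), (1, 1)]
    [0, 0] 0 none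

-- ===== PRECONDITION & SPEC =====
-- Pre_ excludes the inputs on which the Python A raises IndexError: a neighbour cell out of range in
-- matrix_eat, or out of range in matrix_len.  For matrix_len this over-approximates A's accesses
-- (A reads matrix_len only at cells whose eat equals the running max): Pre_ is slightly narrower than
-- A's domain there, kept closed-form instead of re-simulating the max computation.
def Pre_index_best_around (matrix_len : List (List Int)) (i : Int) (k : Int) (matrix_eat : List (List Int)) : Prop :=
  ∀ a ∈ [i-1, i, i+1], ∀ b ∈ [k-1, k, k+1],
    (0 ≤ a ∧ a < 10 ∧ 0 ≤ b ∧ b < 10 ∧ ¬(a = i ∧ b = k)) →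
      (a < (matrix_eat.length : Int) ∧ b < ((matrix_eat.getD a.toNat []).length : Int) ∧
       a < (matrix_len.length : Int) ∧ b < ((matrix_len.getD a.toNat []).length : Int))
instance (matrix_len : List (List Int)) (i : Int) (k : Int) (matrix_eat : List (List Int)) : Decidable (Pre_index_best_around matrix_len i k matrix_eat) := by unfold Pre_index_best_around; infer_instance

def pvWitness_index_best_around : List (List Int) × Int × Int × List (List Int) :=
  ([[1, 2], [3, 4]], 0, 0, [[1, 2], [3, 4]])

def Spec_index_best_around (matrix_len : List (List Int)) (i : Int) (k : Int) (matrix_eat : List (List Int)) (out : List Int) : Prop := out = index_best_around_alt matrix_len i k matrix_eat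
instance (matrix_len : List (List Int)) (i : Int) (k : Int) (matrix_eat : List (List Int)) (out : List Int) : Decidable (Spec_index_best_around matrix_len i k matrix_eat out) := by unfold Spec_index_best_around; infer_instance

-- ===== CLAIM (what is proved, stated in full; the proofs are below) =====
def Claim_equal_index_best_around : Prop := ∀ (matrix_len : List (List Int)) (i : Int) (k : Int) (matrix_eat : List (List Int)), Dom_index_best_around matrix_len i k matrix_eat → Pre_index_best_around matrix_len i k matrix_eat → Spec_index_best_around matrix_len i k matrix_eat (index_best_around matrix_len i k matrix_eat)

-- ===== LEMMAS AND PROOFS =====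

-- proof-side abbreviations for the two matrix reads
def pvEat (matrix_eat : List (List Int)) (c : Int × Int) : Int :=
  PySem.List.pyGetD (PySem.List.pyGetD matrix_eat c.1 []) c.2 0
def pvLen (matrix_len : List (List Int)) (c : Int × Int) : Int :=
  PySem.List.pyGetD (PySem.List.pyGetD matrix_len c.1 []) c.2 0

-- the in-bounds neighbour cells produced by a list of offsets (row-major, as pvGoB visits them)
def pvCells (i k : Int) : List (Int × Int) → List (Int × Int)
  | [] => []
  | (da, db) :: rest =>
      if 0 ≤ i + da ∧ i + da < 10 ∧ 0 ≤ k + db ∧ k + db < 10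
      then (i + da, k + db) :: pvCells i k rest else pvCells i k rest

-- B's fused step / A's selection step as named functions
def pvStepB (eat lenv : Int × Int → Int) (s : List Int × Int × Option Int) (c : Int × Int) :
    List Int × Int × Option Int :=
  if eat c > s.2.1 then ([c.1, c.2], eat c, some (lenv c))
  else if eat c = s.2.1 ∧ pvLtO (lenv c) s.2.2 then
    ([c.1, c.2], s.2.1, some (lenv c))
  else s

def pvStepA (eat lenv : Int × Int → Int) (m : Int) (s : (Int × Int) × Option Int) (c : Int × Int) :
    (Int × Int) × Option Int :=
  if eat c = m then
    match s.2 with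
    | none => (c, some (lenv c))
    | some low => if lenv c < low then (c, some (lenv c)) else s
  else s

-- pvGoB IS the fold of pvStepB over the in-bounds cells of the offsets
theorem pvGoB_eq_foldl (matrix_len : List (List Int)) (i k : Int) (matrix_eat : List (List Int))
    (offs : List (Int × Int)) (best : List Int) (be : Int) (bl : Option Int) :
    pvGoB matrix_len i k matrix_eat offs best be bl
      = ((pvCells i k offs).foldl (pvStepB (pvEat matrix_eat) (pvLen matrix_len)) (best, be, bl)).1 := by
  induction offs generalizing best be bl with
  | nil => rfl
  | cons p rest ih =>
      obtain ⟨da, db⟩ := p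
      simp only [pvGoB, pvCells]
      by_cases hg : 0 ≤ i + da ∧ i + da < 10 ∧ 0 ≤ k + db ∧ k + db < 10
      · rw [if_pos hg, if_pos hg, List.foldl_cons]
        by_cases h1 : PySem.List.pyGetD (PySem.List.pyGetD matrix_eat (i+da) []) (k+db) 0 > be
        · rw [if_pos h1, ih,
              show pvStepB (pvEat matrix_eat) (pvLen matrix_len) (best, be, bl) (i+da, k+db)
                = ([i+da, k+db], PySem.List.pyGetD (PySem.List.pyGetD matrix_eat (i+da) []) (k+db) 0,
                   some (PySem.List.pyGetD (PySem.List.pyGetD matrix_len (i+da) []) (k+db) 0))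
                from by simp [pvStepB, pvEat, pvLen, h1]]
        · rw [if_neg h1]
          by_cases h2 : PySem.List.pyGetD (PySem.List.pyGetD matrix_eat (i+da) []) (k+db) 0 = be ∧
              pvLtO (PySem.List.pyGetD (PySem.List.pyGetD matrix_len (i+da) []) (k+db) 0) bl = true
          · rw [if_pos h2, ih,
                show pvStepB (pvEat matrix_eat) (pvLen matrix_len) (best, be, bl) (i+da, k+db)
                  = ([i+da, k+db], be,
                     some (PySem.List.pyGetD (PySem.List.pyGetD matrix_len (i+da) []) (k+db) 0))
                  from by simp [pvStepB, pvEat, pvLen, h2.1, h2.2]]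
          · rw [if_neg h2, ih,
                show pvStepB (pvEat matrix_eat) (pvLen matrix_len) (best, be, bl) (i+da, k+db)
                  = (best, be, bl)
                  from by
                    simp only [pvStepB, pvEat, pvLen]
                    rw [if_neg h1, if_neg h2]]
      · rw [if_neg hg, if_neg hg, ih]

-- range(i-1, i+2) is the three-element list [i-1, i, i+1]
theorem pv_range3 (i : Int) : PySem.List.pyRange (i-1) (i+2) 1 = [i-1, i, i+1] := by
  rw [PySem.List.pyRange_one_cons (by omega)]
  have h1 : i - 1 + 1 = i := by omega
  rw [h1, PySem.List.pyRange_one_cons (by omega), PySem.List.pyRange_one_cons (by omega),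
      PySem.List.pyRange_one_eq_nil (by omega)]

-- the inner loop of A's list builder equals a filter+map over the same row (as in A's comprehension reading)
theorem pv_inner_eq (i k a : Int) (bs : List Int) (acc : List (Int × Int)) :
    bs.foldl (fun acc' b =>
        if 10 > a ∧ a ≥ 0 ∧ 10 > b ∧ b ≥ 0 ∧ (a ≠ i ∨ b ≠ k) then acc' ++ [(a,b)] else acc') acc
    = acc ++ (bs.filter (fun b => decide (0 ≤ a ∧ a < 10 ∧ 0 ≤ b ∧ b < 10 ∧ ¬(a = i ∧ b = k)))).map (fun b => (a, b)) := by
  induction bs generalizing acc with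
  | nil => simp
  | cons b bs ih =>
      simp only [List.foldl_cons, List.filter_cons]
      by_cases h : 10 > a ∧ a ≥ 0 ∧ 10 > b ∧ b ≥ 0 ∧ (a ≠ i ∨ b ≠ k)
      · rw [if_pos h, ih, if_pos (by simp only [decide_eq_true_eq]; tauto), List.map_cons]
        simp
      · rw [if_neg h, ih, if_neg (by simp only [decide_eq_true_eq]; tauto)]

theorem pvCells_append (i k : Int) (l1 l2 : List (Int × Int)) :
    pvCells i k (l1 ++ l2) = pvCells i k l1 ++ pvCells i k l2 := by
  induction l1 with
  | nil => rfl
  | cons p rest ih =>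
      obtain ⟨da, db⟩ := p
      simp only [List.cons_append, pvCells, ih]
      split_ifs <;> simp

-- a row at offset da ≠ 0: the (a ≠ i)-half of A's guard is vacuous
theorem pv_row_ne (i k da : Int) (hda : da ≠ 0) :
    (([k-1, k, k+1].filter (fun b =>
        decide (0 ≤ i+da ∧ i+da < 10 ∧ 0 ≤ b ∧ b < 10 ∧ ¬(i+da = i ∧ b = k)))).map (fun b => (i+da, b)))
    = pvCells i k [(da, -1), (da, 0), (da, 1)] := by
  simp only [pvCells, List.filter_cons, List.filter_nil, decide_eq_true_eq,
    show k + -1 = k - 1 from by ring, show k + 0 = k from by ring]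
  split_ifs <;> simp_all <;> omega

-- the middle row (da = 0): the centre cell (i,k) is excluded by A's guard and absent from B's offsets
theorem pv_row_mid (i k : Int) :
    (([k-1, k, k+1].filter (fun b =>
        decide (0 ≤ i ∧ i < 10 ∧ 0 ≤ b ∧ b < 10 ∧ ¬(i = i ∧ b = k)))).map (fun b => (i, b)))
    = pvCells i k [(0, -1), (0, 1)] := by
  simp only [pvCells, List.filter_cons, List.filter_nil, decide_eq_true_eq,
    show k + -1 = k - 1 from by ring, show i + 0 = i from by ring]
  split_ifs <;> simp_all <;> omega

-- A's nested candidate-list builder produces exactly pvCells of the eight offsets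
theorem pv_build_eq (i k : Int) :
    ([i-1, i, i+1].foldl (fun acc a =>
        ([k-1, k, k+1].foldl (fun acc' b =>
          if 10 > a ∧ a ≥ 0 ∧ 10 > b ∧ b ≥ 0 ∧ (a ≠ i ∨ b ≠ k) then acc' ++ [(a,b)] else acc') acc)) [])
      = pvCells i k [(-1, -1), (-1, 0), (-1, 1), (0, -1), (0, 1), (1, -1), (1, 0), (1, 1)] := by
  have hsplit : pvCells i k [(-1, -1), (-1, 0), (-1, 1), (0, -1), (0, 1), (1, -1), (1, 0), (1, 1)]
      = pvCells i k [(-1, -1), (-1, 0), (-1, 1)] ++ pvCells i k [(0, -1), (0, 1)]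
        ++ pvCells i k [(1, -1), (1, 0), (1, 1)] := by
    rw [← pvCells_append, ← pvCells_append]; rfl
  rw [hsplit, List.foldl_cons, List.foldl_cons, List.foldl_cons, List.foldl_nil,
      pv_inner_eq, pv_inner_eq, pv_inner_eq, List.nil_append]
  have h1 := pv_row_ne i k (-1) (by omega)
  have h3 := pv_row_ne i k 1 (by omega)
  rw [show i + -1 = i - 1 from by ring] at h1
  rw [h1, pv_row_mid, h3, List.append_assoc]

-- if no element of L has eat value m, A's selection fold leaves the state unchanged
theorem pv_sel_id (eat lenv : Int × Int → Int) (m : Int) (L : List (Int × Int))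
    (h : ∀ c ∈ L, eat c ≠ m) (s : (Int × Int) × Option Int) :
    L.foldl (pvStepA eat lenv m) s = s := by
  induction L generalizing s with
  | nil => rfl
  | cons c L ih =>
      rw [List.foldl_cons, pvStepA, if_neg (h c (by simp))]
      exact ih (fun x hx => h x (by simp [hx])) s

-- every element of L is bounded by A's running-max fold seeded with 0
theorem pv_le_max (eat : Int × Int → Int) (L : List (Int × Int)) :
    (∀ c ∈ L, eat c ≤ L.foldl (fun m c => if eat c > m then eat c else m) 0) ∧
      0 ≤ L.foldl (fun m c => if eat c > m then eat c else m) 0 := by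
  have hfold : (fun (m : Int) (c : Int × Int) => if eat c > m then eat c else m)
      = fun m c => max m (eat c) := by
    funext m c; simp only [max_def]; split_ifs <;> omega
  rw [hfold, show (fun (m : Int) (c : Int × Int) => max m (eat c)) = fun m c => (fun x y => max x y) m (eat c) from rfl,
      ← List.foldl_map]
  refine ⟨fun c hc => (PySem.List.le_foldl_max (L.map eat) 0).2 _ (List.mem_map_of_mem hc), (PySem.List.le_foldl_max (L.map eat) 0).1⟩

-- THE FUSION LEMMA: B's single fold equals A's running-max fold followed by A's selection fold
theorem pv_fused (eat lenv : Int × Int → Int) (L : List (Int × Int)) :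
    L.foldl (pvStepB eat lenv) ([0, 0], 0, none)
      = (let m := L.foldl (fun mm c => if eat c > mm then eat c else mm) 0
         let s := L.foldl (pvStepA eat lenv m) ((0, 0), none)
         ([s.1.1, s.1.2], m, s.2)) := by
  induction L using List.reverseRecOn with
  | nil => rfl
  | append_singleton L c ih =>
      simp only [List.foldl_append, List.foldl_cons, List.foldl_nil] at *
      set m := L.foldl (fun mm c => if eat c > mm then eat c else mm) 0 with hm
      by_cases h1 : eat c > m
      · -- the new cell strictly raises the max: it wins outright
        rw [ih]
        have hm' : (if eat c > m then eat c else m) = eat c := if_pos h1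
        rw [hm']
        have hid : L.foldl (pvStepA eat lenv (eat c)) ((0, 0), none) = ((0, 0), none) := by
          refine pv_sel_id eat lenv (eat c) L (fun x hx hxe => ?_) _
          have := (pv_le_max eat L).1 x hx
          omega
        rw [hid]
        simp [pvStepB, pvStepA, h1]
      · -- the max is unchanged; both sides apply the same tie-breaking step
        have hm' : (if eat c > m then eat c else m) = m := if_neg h1
        rw [hm', ih]
        set s := L.foldl (pvStepA eat lenv m) ((0, 0), none) with hs
        by_cases h2 : eat c = m
        · cases hbl : s.2 with
          | none =>
              simp [pvStepB, pvStepA, pvLtO, h2, hbl]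
          | some low =>
              by_cases h3 : lenv c < low
              · simp [pvStepB, pvStepA, pvLtO, h2, hbl, h3]
              · simp [pvStepB, pvStepA, pvLtO, h2, hbl, h3]
        · simp [pvStepB, pvStepA, pvLtO, h1, h2]

-- ===== VERDICT (by name: the statement is the Claim_ definition above) =====
theorem index_best_around_spec : Claim_equal_index_best_around := by
  intro matrix_len i k matrix_eat _ _
  unfold Spec_index_best_around index_best_around index_best_around_alt
  rw [pvGoB_eq_foldl]
  simp only [pv_range3, pv_build_eq]
  have hA : (fun (s : (Int × Int) × Option Int) (c : Int × Int) =>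
      if PySem.List.pyGetD (PySem.List.pyGetD matrix_eat c.1 []) c.2 0 =
          (pvCells i k [(-1,-1),(-1,0),(-1,1),(0,-1),(0,1),(1,-1),(1,0),(1,1)]).foldl
            (fun m c => if PySem.List.pyGetD (PySem.List.pyGetD matrix_eat c.1 []) c.2 0 > m
              then PySem.List.pyGetD (PySem.List.pyGetD matrix_eat c.1 []) c.2 0 else m) 0 then
        match s.2 with
        | none => (c, some (PySem.List.pyGetD (PySem.List.pyGetD matrix_len c.1 []) c.2 0))
        | some low =>
            if PySem.List.pyGetD (PySem.List.pyGetD matrix_len c.1 []) c.2 0 < low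
            then (c, some (PySem.List.pyGetD (PySem.List.pyGetD matrix_len c.1 []) c.2 0)) else s
      else s)
      = pvStepA (pvEat matrix_eat) (pvLen matrix_len)
          ((pvCells i k [(-1,-1),(-1,0),(-1,1),(0,-1),(0,1),(1,-1),(1,0),(1,1)]).foldl
            (fun m c => if pvEat matrix_eat c > m then pvEat matrix_eat c else m) 0) := by
    rfl
  rw [hA, pv_fused (pvEat matrix_eat) (pvLen matrix_len)]

theorem pv_witness_ok :
    Dom_index_best_around (pvWitness_index_best_around.1) (pvWitness_index_best_around.2.1) (pvWitness_index_best_around.2.2.1) (pvWitness_index_best_around.2.2.2)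
    ∧ Pre_index_best_around (pvWitness_index_best_around.1) (pvWitness_index_best_around.2.1) (pvWitness_index_best_around.2.2.1) (pvWitness_index_best_around.2.2.2) := by
  constructor <;> decide
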